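-- pv_equiv track=rewrite | github.com/tr1ten/DNA | C_MEX_Repetition.py | solve
-- ===== SOURCE A (Python) =====
-- def solve(A,k):
--     n = len(A)
--     k = k%(n+1)
--     if k==0: return A
--     x=0;
--     st = set(A)
--     while x in st: x+=1;
--     A.append(x)
--     return  A[-(k):] + A[:-(k+1)]
-- ===== SOURCE B (Python) =====
-- def solve(A, k):
--     n = len(A)
--     k = k % (n + 1)
--     if k == 0:
--         return A
--     x = 0
--     for v in sorted(A):
--         if v < x:
--             continue
--         if v == x:
--             x += 1
--         else:
--             break
--     cut = n - k
--     out = A[cut + 1:] + [x] + A[:cut]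
--     A.append(x)
--     return out
-- ===== Notes on version B (the rewrite author's own statement) =====
-- stated objective: alternative
-- what changed: The set+unbounded-while MEX search is replaced by a single scan over sorted(A) with early break, and the negative-index slices of the mutated list are replaced by direct take/drop concatenation around the MEX on the original list (same append side effect).
import Mathlib
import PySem

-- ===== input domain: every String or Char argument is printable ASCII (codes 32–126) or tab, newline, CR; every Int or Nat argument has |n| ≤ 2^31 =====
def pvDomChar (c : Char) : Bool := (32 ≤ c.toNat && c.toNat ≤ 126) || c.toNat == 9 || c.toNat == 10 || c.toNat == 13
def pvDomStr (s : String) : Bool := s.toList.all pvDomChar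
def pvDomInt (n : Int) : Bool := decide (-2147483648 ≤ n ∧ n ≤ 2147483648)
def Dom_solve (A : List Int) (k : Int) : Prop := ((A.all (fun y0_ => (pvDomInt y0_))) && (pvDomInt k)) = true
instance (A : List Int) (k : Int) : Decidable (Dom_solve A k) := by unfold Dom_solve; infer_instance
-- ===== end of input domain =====

-- B replaces the set+while MEX with a sorted-scan MEX and the negative slices of the
-- appended list with take/drop concatenation (objective: alternative decomposition).
-- Both Pythons append the MEX to A in place; the theorems are about the return value.

-- ===== PORT A =====
-- while x in st: x += 1  — fuel |A|+1 is exact: the loop consumes distinct members of set(A)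
def mexWhile (st : PySem.Set Int) : Nat → Int → Int
  | 0, x => x
  | fuel+1, x => if x ∈ st then mexWhile st fuel (x+1) else x

def solve (A : List Int) (k : Int) : List Int :=
  let n : Int := A.length
  let k' := PySem.Int.mod k (n + 1)
  if k' = 0 then A
  else
    let st := PySem.Set.ofList A
    let x := mexWhile st (A.length + 1) 0
    let A' := A ++ [x]
    PySem.List.slice A' (some (-k')) none ++ PySem.List.slice A' none (some (-(k'+1)))

-- ===== PORT B =====
-- for v in sorted(A): skip v<x; bump on v==x; break on v>x
def mexScan : List Int → Int → Int
  | [], x => x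
  | v :: rest, x => if v < x then mexScan rest x else if v = x then mexScan rest (x+1) else x

def solve_alt (A : List Int) (k : Int) : List Int :=
  let n : Int := A.length
  let k' := PySem.Int.mod k (n + 1)
  if k' = 0 then A
  else
    let x := mexScan (PySem.List.sorted A (fun v => v) false) 0
    let cut := n - k'
    PySem.List.slice A (some (cut + 1)) none ++ [x] ++ PySem.List.slice A none (some cut)

-- ===== PRECONDITION & SPEC =====
def Spec_solve (A : List Int) (k : Int) (out : List Int) : Prop := out = solve_alt A k
instance (A : List Int) (k : Int) (out : List Int) : Decidable (Spec_solve A k out) := by unfold Spec_solve; infer_instance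

-- ===== CLAIM (what is proved, stated in full; the proofs are below) =====
def Claim_equal_solve : Prop := ∀ (A : List Int) (k : Int), Dom_solve A k → Spec_solve A k (solve A k)

-- ===== LEMMAS AND PROOFS =====

-- "r is the MEX of A"
def IsMex (A : List Int) (r : Int) : Prop := 0 ≤ r ∧ r ∉ A ∧ ∀ y : Int, 0 ≤ y → y < r → y ∈ A

theorem isMex_unique {A : List Int} {r s : Int} (hr : IsMex A r) (hs : IsMex A s) : r = s := by
  rcases lt_trichotomy r s with h | h | h
  · exact absurd (hs.2.2 r hr.1 h) hr.2.1
  · exact h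
  · exact absurd (hr.2.2 s hs.1 h) hs.2.1

theorem mexWhile_spec (st : PySem.Set Int) :
    ∀ (fuel : Nat) (x : Int), (∃ m : Int, x ≤ m ∧ m < x + (fuel : Int) ∧ m ∉ st) →
      x ≤ mexWhile st fuel x ∧ mexWhile st fuel x ∉ st ∧
        ∀ y : Int, x ≤ y → y < mexWhile st fuel x → y ∈ st := by
  intro fuel
  induction fuel with
  | zero =>
      intro x ⟨m, h1, h2, _⟩
      exfalso; simp at h2; omega
  | succ f ih =>
      intro x ⟨m, h1, h2, h3⟩
      by_cases hx : x ∈ st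
      · have hm : x + 1 ≤ m := by
          rcases eq_or_lt_of_le h1 with rfl | h
          · exact absurd hx h3
          · omega
        have := ih (x+1) ⟨m, hm, by push_cast at h2 ⊢; omega, h3⟩
        refine ⟨by have := this.1; simp only [mexWhile, if_pos hx]; omega,
          by simpa only [mexWhile, if_pos hx] using this.2.1, ?_⟩
        intro y hy1 hy2
        simp only [mexWhile, if_pos hx] at hy2
        rcases eq_or_lt_of_le hy1 with rfl | h
        · exact hx
        · exact this.2.2 y (by omega) hy2
      · simp only [mexWhile, if_neg hx]
        exact ⟨le_refl x, hx, fun y h1 h2 => absurd h2 (by omega)⟩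

theorem exists_not_mem (A : List Int) :
    ∃ m : Int, 0 ≤ m ∧ m < (A.length : Int) + 1 ∧ m ∉ A := by
  by_contra h
  push Not at h
  have hsub : (Finset.range (A.length + 1)).image (fun i : Nat => (i : Int)) ⊆ A.toFinset := by
    intro z hz
    simp only [Finset.mem_image, Finset.mem_range] at hz
    obtain ⟨i, hi, rfl⟩ := hz
    exact List.mem_toFinset.mpr (h i (by positivity) (by exact_mod_cast hi))
  have hc := Finset.card_le_card hsub
  rw [Finset.card_image_of_injective _ (fun a b h => by exact_mod_cast h), Finset.card_range] at hc
  have := A.toFinset_card_le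
  omega

theorem mexWhile_isMex (A : List Int) : IsMex A (mexWhile (PySem.Set.ofList A) (A.length + 1) 0) := by
  obtain ⟨m, hm0, hm1, hm2⟩ := exists_not_mem A
  have := mexWhile_spec (PySem.Set.ofList A) (A.length + 1) 0
    ⟨m, hm0, by push_cast; omega, by simpa [PySem.Set.mem_ofList] using hm2⟩
  exact ⟨this.1, by simpa [PySem.Set.mem_ofList] using this.2.1,
    fun y h1 h2 => by simpa [PySem.Set.mem_ofList] using this.2.2 y h1 h2⟩

theorem mexScan_spec :
    ∀ (s : List Int), s.Pairwise (· ≤ ·) → ∀ x : Int,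
      x ≤ mexScan s x ∧ mexScan s x ∉ s ∧
        ∀ y : Int, x ≤ y → y < mexScan s x → y ∈ s := by
  intro s
  induction s with
  | nil =>
      intro _ x
      exact ⟨le_refl x, by simp, fun y h1 h2 => absurd h2 (by simp [mexScan]; omega)⟩
  | cons v rest ih =>
      intro hp x
      have hrest := ih (List.pairwise_cons.mp hp).2
      have hv := (List.pairwise_cons.mp hp).1
      by_cases h1 : v < x
      · have hms : mexScan (v :: rest) x = mexScan rest x := by simp [mexScan, h1]
        rw [hms]
        obtain ⟨a1, a2, a3⟩ := hrest x
        refine ⟨a1, ?_, ?_⟩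
        · simp only [List.mem_cons, not_or]
          exact ⟨by omega, a2⟩
        · intro y hy1 hy2
          exact List.mem_cons_of_mem v (a3 y hy1 hy2)
      · by_cases h2 : v = x
        · subst h2
          have hms : mexScan (v :: rest) v = mexScan rest (v+1) := by simp [mexScan]
          rw [hms]
          obtain ⟨a1, a2, a3⟩ := hrest (v+1)
          refine ⟨by omega, ?_, ?_⟩
          · simp only [List.mem_cons, not_or]
            exact ⟨by omega, a2⟩
          · intro y hy1 hy2
            rcases eq_or_lt_of_le hy1 with rfl | h
            · exact List.mem_cons_self
            · exact List.mem_cons_of_mem v (a3 y (by omega) hy2)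
        · have hms : mexScan (v :: rest) x = x := by simp [mexScan, h1, h2]
          rw [hms]
          refine ⟨le_refl x, ?_, fun y hy1 hy2 => absurd hy2 (by omega)⟩
          simp only [List.mem_cons, not_or]
          exact ⟨fun hc => h2 hc.symm, fun hc => by have := hv x hc; omega⟩

theorem mexScan_isMex (A : List Int) : IsMex A (mexScan (PySem.List.sorted A (fun v => v) false) 0) := by
  have hp : (PySem.List.sorted A (fun v => v) false).Pairwise (· ≤ ·) :=
    PySem.List.sorted_pairwise A (fun v => v)
  have := mexScan_spec _ hp 0
  exact ⟨this.1, by simpa [PySem.List.mem_sorted] using this.2.1,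
    fun y h1 h2 => by simpa [PySem.List.mem_sorted] using this.2.2 y h1 h2⟩

theorem mex_eq (A : List Int) :
    mexWhile (PySem.Set.ofList A) (A.length + 1) 0
      = mexScan (PySem.List.sorted A (fun v => v) false) 0 :=
  isMex_unique (mexWhile_isMex A) (mexScan_isMex A)


theorem drop_append_le {α : Type} (l1 l2 : List α) (n : Nat) (h : n ≤ l1.length) :
    (l1 ++ l2).drop n = l1.drop n ++ l2 := by
  induction l1 generalizing n with
  | nil =>
      have : n = 0 := by simp at h; omega
      subst this; simp
  | cons a t ih =>
      cases n with
      | zero => simp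
      | succ m =>
          simp only [List.cons_append, List.drop_succ_cons]
          exact ih m (by simp at h; omega)

theorem take_append_le {α : Type} (l1 l2 : List α) (n : Nat) (h : n ≤ l1.length) :
    (l1 ++ l2).take n = l1.take n := by
  induction l1 generalizing n with
  | nil =>
      have : n = 0 := by simp at h; omega
      subst this; simp
  | cons a t ih =>
      cases n with
      | zero => simp
      | succ m =>
          simp only [List.cons_append, List.take_succ_cons]
          rw [ih m (by simp at h; omega)]

-- ===== VERDICT (by name: the statement is the Claim_ definition above) =====
theorem solve_spec : Claim_equal_solve := by
  intro A k _
  unfold Spec_solve solve solve_alt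
  simp only []
  set kk := PySem.Int.mod k ((A.length : Int) + 1) with hkkdef
  have hpos : (0 : Int) < (A.length : Int) + 1 := by positivity
  have hb : 0 ≤ kk ∧ kk < (A.length : Int) + 1 := by
    rw [hkkdef, PySem.Int.mod_eq_emod_of_pos hpos]
    exact ⟨Int.emod_nonneg k (by omega), Int.emod_lt_of_pos k hpos⟩
  by_cases h0 : kk = 0
  · simp [h0]
  · simp only [if_neg h0]
    obtain ⟨K, hK⟩ : ∃ K : Nat, kk = (K : Int) := ⟨kk.toNat, by omega⟩
    have hK1 : 1 ≤ K := by omega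
    have hKn : K ≤ A.length := by omega
    set x := mexWhile (PySem.Set.ofList A) (A.length + 1) 0 with hx
    have hxeq := mex_eq A
    rw [← hxeq]
    -- slices on the A side: (A ++ [x])[-k:] and (A ++ [x])[:-(k+1)]
    have hs1 : PySem.List.slice (A ++ [x]) (some (-kk)) none
        = (A ++ [x]).drop ((A ++ [x]).length - K) := by
      rw [hK]; exact PySem.List.slice_from_neg_natCast _ K (by omega)
    have hs2 : PySem.List.slice (A ++ [x]) none (some (-(kk+1)))
        = (A ++ [x]).take ((A ++ [x]).length - (K+1)) := by
      have : -(kk+1) = -((K+1 : Nat) : Int) := by rw [hK]; push_cast; ring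
      rw [this]; exact PySem.List.slice_to_neg_natCast _ (K+1) (by omega)
    -- slices on the B side: A[cut+1:] and A[:cut] with cut = n - k ≥ 0
    have hcut : (A.length : Int) - kk + 1 = ((A.length - K + 1 : Nat) : Int) := by
      rw [hK]; omega
    have hcut2 : (A.length : Int) - kk = ((A.length - K : Nat) : Int) := by
      rw [hK]; omega
    have hs3 : PySem.List.slice A (some ((A.length : Int) - kk + 1)) none
        = A.drop (A.length - K + 1) := by
      rw [hcut]; exact PySem.List.slice_from_natCast A _
    have hs4 : PySem.List.slice A none (some ((A.length : Int) - kk))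
        = A.take (A.length - K) := by
      rw [hcut2]; exact PySem.List.slice_to_natCast A _
    rw [hs1, hs2, hs3, hs4]
    have hlen : (A ++ [x]).length = A.length + 1 := by simp
    rw [hlen]
    have hdrop : (A ++ [x]).drop (A.length + 1 - K) = A.drop (A.length - K + 1) ++ [x] := by
      have hn : A.length + 1 - K = A.length - K + 1 := by omega
      rw [hn]
      exact drop_append_le A [x] _ (by omega)
    have htake : (A ++ [x]).take (A.length + 1 - (K+1)) = A.take (A.length - K) := by
      have hn : A.length + 1 - (K+1) = A.length - K := by omega
      rw [hn]
      exact take_append_le A [x] _ (by omega)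
    rw [hdrop, htake]
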